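-- pv_equiv track=rewrite | github.com/tpdus751/Solved-algorithm-quiz-in-BOJ-or-Programmers | 프로그래머스/1/388351. 유연근무제/유연근무제.py | solution
-- ===== SOURCE A (Python) =====
-- def solution(schedules, timelogs, startday):
--     answer = 0
--
--     day = ["월", "화", "수", "목", "금", "토", "일"] # 만약 startday가 5라면 금요일 5번째 인덱스
--
--     count = len(schedules) # 총 인원 초기화
--
--     start_day = startday
--
--     for person_idx in range(len(schedules)):
--         startday = start_day
--         limit_time = schedules[person_idx] + 10
--         if limit_time % 100 >= 60:
--             limit_time += 40
--         for yoil_idx in range(7):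
--             startday = start_day + yoil_idx
--             current_day = startday
--             if current_day >= 8:
--                 current_day = current_day - 7
--             if 6 <= current_day <= 7:
--                 # 주말
--                 if timelogs[person_idx][yoil_idx] > limit_time:
--                     continue
--             else:
--                 # 평일
--                 if timelogs[person_idx][yoil_idx] > limit_time:
--                     count -= 1
--                     break
--
--
--
--     return count
-- ===== SOURCE B (Python) =====
-- def solution(schedules, timelogs, startday):
--     # Stage 1: precompute each person's adjusted punctuality limit.
--     limits = [s + 10 + (40 if (s + 10) % 100 >= 60 else 0) for s in schedules]
--     # Stage 2: column-major sieve -- start with everyone alive and, for each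
--     # weekday column in order, keep only the people on time that day.
--     alive = list(range(len(schedules)))
--     for i in range(7):
--         c = startday + i
--         if c >= 8:
--             c -= 7
--         if not (6 <= c <= 7):
--             alive = [p for p in alive if timelogs[p][i] <= limits[p]]
--     return len(alive)
-- ===== Notes on version B (the rewrite author's own statement) =====
-- stated objective: alternative
-- what changed: B is a two-stage column-major sieve: it first precomputes every person's adjusted limit in one pass, then walks the 7 day columns once, filtering a 'still punctual' survivor list at each weekday column, and returns the survivor count -- instead of A's person-major loop that re-derives the day class per cell, breaks on the first weekday violation and decrements a running total.
import Mathlib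
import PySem

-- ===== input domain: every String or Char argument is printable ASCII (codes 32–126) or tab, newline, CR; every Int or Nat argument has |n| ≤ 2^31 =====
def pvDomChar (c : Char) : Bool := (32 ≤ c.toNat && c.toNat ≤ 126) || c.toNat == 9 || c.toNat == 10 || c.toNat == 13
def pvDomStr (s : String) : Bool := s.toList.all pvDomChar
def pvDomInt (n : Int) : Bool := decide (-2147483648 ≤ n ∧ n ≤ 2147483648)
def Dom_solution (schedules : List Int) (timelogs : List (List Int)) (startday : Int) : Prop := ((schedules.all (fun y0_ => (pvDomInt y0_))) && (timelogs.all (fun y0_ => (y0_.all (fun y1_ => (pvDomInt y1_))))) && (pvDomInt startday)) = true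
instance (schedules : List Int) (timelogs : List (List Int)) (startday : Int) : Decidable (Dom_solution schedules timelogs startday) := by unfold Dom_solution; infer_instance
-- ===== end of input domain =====

-- B replaces A's person-major break/decrement loop by a two-stage column-major sieve
-- (precomputed limits, then a survivor list filtered per weekday column) — objective: alternative.

-- ===== PORT A =====
-- Literal transliteration of A. pyGetD ... 0 / [] stands for xs[i] (none = IndexError);
-- Pre_solution keeps every accessed index in range. The inner 'for yoil_idx in range(7)'
-- with break is the fold with a (count, broken) state; the weekend branch's
-- 'if ... > limit: continue' is a no-op either way and is kept as the identity branch.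
def solution (schedules : List Int) (timelogs : List (List Int)) (startday : Int) : Int :=
  let count : Int := schedules.length
  let start_day := startday
  (PySem.List.pyRange 0 (schedules.length : Int) 1).foldl (fun count person_idx =>
    let limit0 := PySem.List.pyGetD schedules person_idx 0 + 10
    let limit_time := if PySem.Int.mod limit0 100 ≥ 60 then limit0 + 40 else limit0
    let row := PySem.List.pyGetD timelogs person_idx []
    let s := (PySem.List.pyRange 0 7 1).foldl (fun (s : Int × Bool) yoil =>
      if s.2 then s
      else
        let current0 := start_day + yoil
        let current_day := if current0 ≥ 8 then current0 - 7 else current0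
        if 6 ≤ current_day ∧ current_day ≤ 7 then s
        else if PySem.List.pyGetD row yoil 0 > limit_time then (s.1 - 1, true) else s)
      (count, false)
    s.1) count

-- ===== PORT B =====
-- Literal transliteration of Source B: limits list, then the column-major survivor sieve.
def solution_alt (schedules : List Int) (timelogs : List (List Int)) (startday : Int) : Int :=
  let limits := schedules.map (fun s =>
    s + 10 + (if PySem.Int.mod (s + 10) 100 ≥ 60 then 40 else 0))
  let alive0 := PySem.List.pyRange 0 (schedules.length : Int) 1
  let alive := (PySem.List.pyRange 0 7 1).foldl (fun alive i =>
    let c0 := startday + i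
    let c := if c0 ≥ 8 then c0 - 7 else c0
    if ¬ (6 ≤ c ∧ c ≤ 7) then
      alive.filter (fun p => decide (PySem.List.pyGetD (PySem.List.pyGetD timelogs p []) i 0
        ≤ PySem.List.pyGetD limits p 0))
    else alive) alive0
  (alive.length : Int)

-- ===== PRECONDITION & SPEC =====
-- Shared day/limit arithmetic of both ports, used to state Pre_.
def pvCur (startday y : Int) : Int :=
  if startday + y ≥ 8 then startday + y - 7 else startday + y
def pvLimit (schedules : List Int) (p : Int) : Int :=
  if PySem.Int.mod (PySem.List.pyGetD schedules p 0 + 10) 100 ≥ 60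
    then PySem.List.pyGetD schedules p 0 + 10 + 40 else PySem.List.pyGetD schedules p 0 + 10
-- Pre_ holds exactly when Python A returns (no IndexError): every person has a timelog row, and
-- each such row either has the full 7 entries or contains an in-row weekday violation at which
-- A's inner loop breaks before running past the row's end.
def Pre_solution (schedules : List Int) (timelogs : List (List Int)) (startday : Int) : Prop :=
  schedules.length ≤ timelogs.length ∧
  ∀ p < schedules.length, 7 ≤ (timelogs.getD p []).length ∨
    ∃ y < (timelogs.getD p []).length,
      ¬(6 ≤ pvCur startday (y : Int) ∧ pvCur startday (y : Int) ≤ 7) ∧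
        (timelogs.getD p []).getD y 0 > pvLimit schedules (p : Int)
instance (schedules : List Int) (timelogs : List (List Int)) (startday : Int) : Decidable (Pre_solution schedules timelogs startday) := by unfold Pre_solution; infer_instance
def pvWitness_solution : List Int × List (List Int) × Int := ([0], [[0, 0, 0, 0, 0, 0, 0]], 1)

def Spec_solution (schedules : List Int) (timelogs : List (List Int)) (startday : Int) (out : Int) : Prop := out = solution_alt schedules timelogs startday
instance (schedules : List Int) (timelogs : List (List Int)) (startday : Int) (out : Int) : Decidable (Spec_solution schedules timelogs startday out) := by unfold Spec_solution; infer_instance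

-- ===== CLAIM (what is proved, stated in full; the proofs are below) =====
def Claim_equal_solution : Prop := ∀ (schedules : List Int) (timelogs : List (List Int)) (startday : Int), Dom_solution schedules timelogs startday → Pre_solution schedules timelogs startday → Spec_solution schedules timelogs startday (solution schedules timelogs startday)

-- ===== LEMMAS AND PROOFS =====

-- Once the break flag is set, A's inner fold keeps the state unchanged.
theorem pv_inner_stay (v : Int → Int) (w : Int → Prop) [DecidablePred w] (limit x : Int)
    (l : List Int) :
    l.foldl (fun (s : Int × Bool) y =>
      if s.2 then s else if w y then s else if v y > limit then (s.1 - 1, true) else s)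
      (x, true) = (x, true) := by
  induction l with
  | nil => rfl
  | cons y l ih => simpa using ih

-- A's inner break-loop equals "all weekday values within the limit".
theorem pv_inner_fold (v : Int → Int) (w : Int → Prop) [DecidablePred w] (limit c : Int)
    (l : List Int) :
    l.foldl (fun (s : Int × Bool) y =>
      if s.2 then s else if w y then s else if v y > limit then (s.1 - 1, true) else s)
      (c, false)
    = if (l.filter (fun y => !decide (w y))).all (fun d => decide (v d ≤ limit)) then (c, false)
      else (c - 1, true) := by
  induction l with
  | nil => simp
  | cons y l ih =>
    by_cases hw : w y
    · simpa [hw] using ih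
    · by_cases hv : v y > limit
      · simp [hw, hv, pv_inner_stay, List.all_cons, show ¬ v y ≤ limit by omega]
      · simp [hw, hv, ih, List.all_cons, show v y ≤ limit by omega]

-- A's countdown fold: a minus the number of failing elements.
theorem pv_countdown (ok : Int → Bool) (l : List Int) :
    ∀ (a : Int),
      l.foldl (fun c p => if ok p then c else c - 1) a
        = a - l.length + (l.filter ok).length := by
  induction l with
  | nil => intro a; simp
  | cons p l ih =>
    intro a
    by_cases hp : ok p
    · simp only [List.foldl_cons, hp, if_true, ih, List.filter_cons, List.length_cons]
      push_cast; omega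
    · simp only [List.foldl_cons, hp, ih, List.filter_cons, List.length_cons]
      push_cast; omega

-- B's column-major sieve equals one filter by the conjunction over the active columns.
theorem pv_sieve (cond : Int → Bool) (q : Int → Int → Bool) (W : List Int) :
    ∀ (P : List Int),
      W.foldl (fun al i => if cond i then al.filter (fun p => q i p) else al) P
        = P.filter (fun p => (W.filter cond).all (fun i => q i p)) := by
  induction W with
  | nil => intro P; simp
  | cons i W ih =>
    intro P
    by_cases hc : cond i
    · simp only [List.foldl_cons, hc, if_true, ih, List.filter_filter,
        List.filter_cons, List.all_cons]
      exact List.filter_congr (fun p _ => by rw [Bool.and_comm])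
    · simp [hc, ih]

-- ===== VERDICT (by name: the statement is the Claim_ definition above) =====
theorem solution_spec : Claim_equal_solution := by
  intro schedules timelogs startday _ _
  show (PySem.List.pyRange 0 (schedules.length : Int) 1).foldl
      (fun count p =>
        ((PySem.List.pyRange 0 7 1).foldl
          (fun (s : Int × Bool) y =>
            if s.2 then s
            else if 6 ≤ pvCur startday y ∧ pvCur startday y ≤ 7 then s
            else if PySem.List.pyGetD (PySem.List.pyGetD timelogs p []) y 0
                > pvLimit schedules p then (s.1 - 1, true) else s)
          (count, false)).1)
      (schedules.length : Int)
    = solution_alt schedules timelogs startday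
  set n : Int := (schedules.length : Int) with hn
  have hok : ∀ (acc p : Int), p ∈ PySem.List.pyRange 0 n 1 →
      ((PySem.List.pyRange 0 7 1).foldl
        (fun (s : Int × Bool) y =>
          if s.2 then s
          else if 6 ≤ pvCur startday y ∧ pvCur startday y ≤ 7 then s
          else if PySem.List.pyGetD (PySem.List.pyGetD timelogs p []) y 0
              > pvLimit schedules p then (s.1 - 1, true) else s)
        (acc, false)).1
      = if ((PySem.List.pyRange 0 7 1).filter
              (fun y => !decide (6 ≤ pvCur startday y ∧ pvCur startday y ≤ 7))).all
            (fun d => decide (PySem.List.pyGetD (PySem.List.pyGetD timelogs p []) d 0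
              ≤ pvLimit schedules p))
          then acc else acc - 1 := by
    intro acc p _
    rw [pv_inner_fold (fun y => PySem.List.pyGetD (PySem.List.pyGetD timelogs p []) y 0)
      (fun y => 6 ≤ pvCur startday y ∧ pvCur startday y ≤ 7) (pvLimit schedules p)]
    split <;> rfl
  rw [PySem.List.foldl_congr_mem _ _ _ _ hok, pv_countdown]
  show _ = (((PySem.List.pyRange 0 7 1).foldl
      (fun (alive : List Int) i =>
        if ¬ (6 ≤ pvCur startday i ∧ pvCur startday i ≤ 7) then
          alive.filter (fun p => decide (PySem.List.pyGetD (PySem.List.pyGetD timelogs p []) i 0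
            ≤ PySem.List.pyGetD (schedules.map (fun s =>
                s + 10 + (if PySem.Int.mod (s + 10) 100 ≥ 60 then 40 else 0))) p 0))
        else alive) (PySem.List.pyRange 0 n 1)).length : Int)
  have hB : ((PySem.List.pyRange 0 7 1).foldl
      (fun (alive : List Int) i =>
        if ¬ (6 ≤ pvCur startday i ∧ pvCur startday i ≤ 7) then
          alive.filter (fun p => decide (PySem.List.pyGetD (PySem.List.pyGetD timelogs p []) i 0
            ≤ PySem.List.pyGetD (schedules.map (fun s =>
                s + 10 + (if PySem.Int.mod (s + 10) 100 ≥ 60 then 40 else 0))) p 0))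
        else alive) (PySem.List.pyRange 0 n 1))
      = (PySem.List.pyRange 0 n 1).filter
          (fun p => ((PySem.List.pyRange 0 7 1).filter
              (fun i => !decide (6 ≤ pvCur startday i ∧ pvCur startday i ≤ 7))).all
            (fun i => decide (PySem.List.pyGetD (PySem.List.pyGetD timelogs p []) i 0
              ≤ PySem.List.pyGetD (schedules.map (fun s =>
                  s + 10 + (if PySem.Int.mod (s + 10) 100 ≥ 60 then 40 else 0))) p 0))) := by
    have hs := pv_sieve (fun i => !decide (6 ≤ pvCur startday i ∧ pvCur startday i ≤ 7))
      (fun i p => decide (PySem.List.pyGetD (PySem.List.pyGetD timelogs p []) i 0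
        ≤ PySem.List.pyGetD (schedules.map (fun s =>
            s + 10 + (if PySem.Int.mod (s + 10) 100 ≥ 60 then 40 else 0))) p 0))
      (PySem.List.pyRange 0 7 1) (PySem.List.pyRange 0 n 1)
    rw [← hs]
    exact PySem.List.foldl_congr_mem _ _ _ _ (fun acc i _ => by
      by_cases h : 6 ≤ pvCur startday i ∧ pvCur startday i ≤ 7 <;> simp [h])
  rw [hB]
  have hlim : ∀ p ∈ PySem.List.pyRange 0 n 1,
      PySem.List.pyGetD (schedules.map (fun s =>
          s + 10 + (if PySem.Int.mod (s + 10) 100 ≥ 60 then 40 else 0))) p 0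
        = pvLimit schedules p := by
    intro p hp
    rw [PySem.List.mem_pyRange_one] at hp
    have h1 : p < ((schedules.map (fun s =>
        s + 10 + (if PySem.Int.mod (s + 10) 100 ≥ 60 then 40 else 0))).length : Int) := by
      simpa using hp.2
    have h2 : p < (schedules.length : Int) := by simpa using hp.2
    rw [PySem.List.pyGetD_eq_getElem _ 0 hp.1 h1, List.getElem_map,
      pvLimit, PySem.List.pyGetD_eq_getElem _ 0 hp.1 h2]
    split_ifs <;> omega
  have hfeq : (PySem.List.pyRange 0 n 1).filter
          (fun p => ((PySem.List.pyRange 0 7 1).filter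
              (fun i => !decide (6 ≤ pvCur startday i ∧ pvCur startday i ≤ 7))).all
            (fun i => decide (PySem.List.pyGetD (PySem.List.pyGetD timelogs p []) i 0
              ≤ PySem.List.pyGetD (schedules.map (fun s =>
                  s + 10 + (if PySem.Int.mod (s + 10) 100 ≥ 60 then 40 else 0))) p 0)))
      = (PySem.List.pyRange 0 n 1).filter
          (fun p => ((PySem.List.pyRange 0 7 1).filter
              (fun y => !decide (6 ≤ pvCur startday y ∧ pvCur startday y ≤ 7))).all
            (fun d => decide (PySem.List.pyGetD (PySem.List.pyGetD timelogs p []) d 0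
              ≤ pvLimit schedules p))) := by
    refine List.filter_congr (fun p hp => ?_)
    simp only [hlim p hp]
  rw [hfeq]
  have hlen : ((PySem.List.pyRange 0 n 1).length : Int) = n := by
    rw [PySem.List.length_pyRange_one]; simp [hn]
  omega
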